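-- pv_equiv track=rewrite | github.com/echoxiangzhou/OceanDataTransformer | backend/app/services/metadata_extraction_service.py | _infer_spatiotemporal_from_names
-- ===== SOURCE A (Python) =====
-- from typing import Dict, Any, List, Optional, Tuple
--
-- def _infer_spatiotemporal_from_names(dataset_names: List[str]) -> Dict[str, Any]:
--     """从数据集名称推断时空信息"""
--     info = {}
--
--     # 检查是否包含坐标相关的数据集
--     has_lat = any('lat' in name.lower() for name in dataset_names)
--     has_lon = any('lon' in name.lower() for name in dataset_names)
--     has_time = any('time' in name.lower() or 'date' in name.lower() for name in dataset_names)
--     has_depth = any('depth' in name.lower() or 'level' in name.lower() for name in dataset_names)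
--
--     if has_lat and has_lon:
--         info['has_spatial_coverage'] = True
--     if has_time:
--         info['has_temporal_coverage'] = True
--     if has_depth:
--         info['has_vertical_coverage'] = True
--
--     return info
-- ===== SOURCE B (Python) =====
-- def _infer_spatiotemporal_from_names(dataset_names):
--     """Single pass: lower each name once and OR-accumulate the four flags."""
--     has_lat = has_lon = has_time = has_depth = False
--     for name in dataset_names:
--         lowered = name.lower()
--         has_lat = has_lat or 'lat' in lowered
--         has_lon = has_lon or 'lon' in lowered
--         has_time = has_time or 'time' in lowered or 'date' in lowered
--         has_depth = has_depth or 'depth' in lowered or 'level' in lowered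
--     info = {}
--     if has_lat and has_lon:
--         info['has_spatial_coverage'] = True
--     if has_time:
--         info['has_temporal_coverage'] = True
--     if has_depth:
--         info['has_vertical_coverage'] = True
--     return info
-- ===== Notes on version B (the rewrite author's own statement) =====
-- stated objective: faster
-- what changed: Replaces A's four separate any()-scans over the list (each lowering every name again) with one loop that lowers each name once and OR-accumulates the four flags.
import Mathlib
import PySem

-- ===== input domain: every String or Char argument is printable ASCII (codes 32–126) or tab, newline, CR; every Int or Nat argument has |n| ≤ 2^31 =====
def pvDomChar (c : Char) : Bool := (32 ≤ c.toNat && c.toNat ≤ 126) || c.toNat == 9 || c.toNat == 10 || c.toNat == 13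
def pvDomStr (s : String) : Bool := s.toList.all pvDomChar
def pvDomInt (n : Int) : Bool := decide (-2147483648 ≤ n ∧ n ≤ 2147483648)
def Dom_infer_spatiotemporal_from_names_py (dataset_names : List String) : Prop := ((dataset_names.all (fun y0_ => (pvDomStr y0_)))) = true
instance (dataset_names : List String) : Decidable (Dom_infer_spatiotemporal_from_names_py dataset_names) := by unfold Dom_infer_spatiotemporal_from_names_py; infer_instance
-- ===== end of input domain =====

-- B makes one pass, lowering each name once, instead of A's four separate any-scans (objective: alternative decomposition).

-- ===== PORT A =====
def infer_spatiotemporal_from_names_py (dataset_names : List String) : List (String × Bool) :=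
  let has_lat := dataset_names.any (fun name => PySem.Str.isIn "lat" (PySem.Str.lower name))
  let has_lon := dataset_names.any (fun name => PySem.Str.isIn "lon" (PySem.Str.lower name))
  let has_time := dataset_names.any (fun name =>
    PySem.Str.isIn "time" (PySem.Str.lower name) || PySem.Str.isIn "date" (PySem.Str.lower name))
  let has_depth := dataset_names.any (fun name =>
    PySem.Str.isIn "depth" (PySem.Str.lower name) || PySem.Str.isIn "level" (PySem.Str.lower name))
  let info : PySem.Dict String Bool := PySem.Dict.empty
  let info := if has_lat && has_lon then info.insert "has_spatial_coverage" true else info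
  let info := if has_time then info.insert "has_temporal_coverage" true else info
  let info := if has_depth then info.insert "has_vertical_coverage" true else info
  info.items

-- ===== PORT B =====
def infer_spatiotemporal_from_names_py_alt (dataset_names : List String) : List (String × Bool) :=
  let flags := dataset_names.foldl (fun (acc : Bool × Bool × Bool × Bool) name =>
    let lowered := PySem.Str.lower name
    (acc.1 || PySem.Str.isIn "lat" lowered,
     acc.2.1 || PySem.Str.isIn "lon" lowered,
     acc.2.2.1 || (PySem.Str.isIn "time" lowered || PySem.Str.isIn "date" lowered),
     acc.2.2.2 || (PySem.Str.isIn "depth" lowered || PySem.Str.isIn "level" lowered)))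
    (false, false, false, false)
  let info : PySem.Dict String Bool := PySem.Dict.empty
  let info := if flags.1 && flags.2.1 then info.insert "has_spatial_coverage" true else info
  let info := if flags.2.2.1 then info.insert "has_temporal_coverage" true else info
  let info := if flags.2.2.2 then info.insert "has_vertical_coverage" true else info
  info.items

-- ===== PRECONDITION & SPEC =====
def Spec_infer_spatiotemporal_from_names_py (dataset_names : List String) (out : List (String × Bool)) : Prop := out = infer_spatiotemporal_from_names_py_alt dataset_names
instance (dataset_names : List String) (out : List (String × Bool)) : Decidable (Spec_infer_spatiotemporal_from_names_py dataset_names out) := by unfold Spec_infer_spatiotemporal_from_names_py; infer_instance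

-- ===== CLAIM (what is proved, stated in full; the proofs are below) =====
def Claim_equal_infer_spatiotemporal_from_names_py : Prop := ∀ (dataset_names : List String), Dom_infer_spatiotemporal_from_names_py dataset_names → Spec_infer_spatiotemporal_from_names_py dataset_names (infer_spatiotemporal_from_names_py dataset_names)

-- ===== LEMMAS AND PROOFS =====

-- The fold computes exactly the four any-scans (OR-accumulated from any start).
theorem pv_fold_flags (ds : List String) (a b c d : Bool) :
    ds.foldl (fun (acc : Bool × Bool × Bool × Bool) name =>
      let lowered := PySem.Str.lower name
      (acc.1 || PySem.Str.isIn "lat" lowered,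
       acc.2.1 || PySem.Str.isIn "lon" lowered,
       acc.2.2.1 || (PySem.Str.isIn "time" lowered || PySem.Str.isIn "date" lowered),
       acc.2.2.2 || (PySem.Str.isIn "depth" lowered || PySem.Str.isIn "level" lowered)))
      (a, b, c, d)
    = (a || ds.any (fun name => PySem.Str.isIn "lat" (PySem.Str.lower name)),
       b || ds.any (fun name => PySem.Str.isIn "lon" (PySem.Str.lower name)),
       c || ds.any (fun name =>
         PySem.Str.isIn "time" (PySem.Str.lower name) || PySem.Str.isIn "date" (PySem.Str.lower name)),
       d || ds.any (fun name =>
         PySem.Str.isIn "depth" (PySem.Str.lower name) || PySem.Str.isIn "level" (PySem.Str.lower name))) := by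
  induction ds generalizing a b c d with
  | nil => simp
  | cons x xs ih =>
    simp only [List.foldl_cons, List.any_cons, ih, Bool.or_assoc]

-- ===== VERDICT (by name: the statement is the Claim_ definition above) =====
theorem infer_spatiotemporal_from_names_py_spec : Claim_equal_infer_spatiotemporal_from_names_py := by
  intro ds _
  show infer_spatiotemporal_from_names_py ds = infer_spatiotemporal_from_names_py_alt ds
  simp only [infer_spatiotemporal_from_names_py, infer_spatiotemporal_from_names_py_alt,
    pv_fold_flags, Bool.false_or, PySem.Dict.empty]
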